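-- pv_equiv track=rewrite | github.com/saballeth/Filtrado-Colaborativo | main.py | calcular_coincidencias
-- ===== SOURCE A (Python) =====
-- def calcular_coincidencias(intereses_por_usuario, inmuebles_con_caracteristicas):
--     coincidencias_todos_usuarios = {}
--     for usuario, intereses in intereses_por_usuario.items():
--         coincidencias_usuario = []
--         for inmueble, caracteristicas in inmuebles_con_caracteristicas.items():
--             coincidencias = [interes for interes in intereses if interes in caracteristicas]
--             if coincidencias:
--                 coincidencias_usuario.append((inmueble, coincidencias))
--         coincidencias_todos_usuarios[usuario] = coincidencias_usuario
--     return coincidencias_todos_usuarios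
-- ===== SOURCE B (Python) =====
-- def calcular_coincidencias(intereses_por_usuario, inmuebles_con_caracteristicas):
--     index = {}
--     for inmueble, caracteristicas in inmuebles_con_caracteristicas.items():
--         for c in dict.fromkeys(caracteristicas):
--             index.setdefault(c, []).append(inmueble)
--     resultado = {}
--     for usuario, intereses in intereses_por_usuario.items():
--         matches = {}
--         for interes in intereses:
--             for inmueble in index.get(interes, []):
--                 matches.setdefault(inmueble, []).append(interes)
--         resultado[usuario] = [(inmueble, matches[inmueble])
--                               for inmueble in inmuebles_con_caracteristicas
--                               if inmueble in matches]
--     return resultado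
-- ===== Notes on version B (the rewrite author's own statement) =====
-- stated objective: faster
-- what changed: B builds an inverted index (characteristic -> properties) in one pass and scatters each user's interests through it into per-property match lists, instead of A's per-user membership scan of every property's characteristic list.
import Mathlib
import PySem

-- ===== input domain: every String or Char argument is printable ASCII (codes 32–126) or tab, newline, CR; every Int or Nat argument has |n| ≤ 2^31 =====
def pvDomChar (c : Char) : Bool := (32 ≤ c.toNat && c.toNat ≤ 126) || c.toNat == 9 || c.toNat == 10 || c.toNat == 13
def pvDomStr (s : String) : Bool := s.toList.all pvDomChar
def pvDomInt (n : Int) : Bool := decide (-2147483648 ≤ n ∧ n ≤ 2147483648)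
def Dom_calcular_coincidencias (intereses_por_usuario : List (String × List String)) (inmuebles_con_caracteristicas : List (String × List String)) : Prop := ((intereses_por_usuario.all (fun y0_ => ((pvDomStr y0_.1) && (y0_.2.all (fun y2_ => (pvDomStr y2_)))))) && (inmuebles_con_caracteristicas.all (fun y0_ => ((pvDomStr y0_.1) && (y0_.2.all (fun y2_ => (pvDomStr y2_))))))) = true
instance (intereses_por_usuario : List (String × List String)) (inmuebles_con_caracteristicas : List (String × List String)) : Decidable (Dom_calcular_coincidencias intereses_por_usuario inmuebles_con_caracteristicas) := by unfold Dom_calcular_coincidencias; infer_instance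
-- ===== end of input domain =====

-- B replaces A's per-user scan of every property's characteristic list by an inverted index
-- (characteristic -> properties) built once, then scatters each user's interests through it (alternative decomposition).

-- ===== PORT A =====
def calcular_coincidencias (intereses_por_usuario : List (String × List String)) (inmuebles_con_caracteristicas : List (String × List String)) : List (String × List (String × List String)) :=
  (intereses_por_usuario.foldl (fun acc p =>
      acc.insert p.1 (inmuebles_con_caracteristicas.foldl (fun cu q =>
        let coincidencias := p.2.filter (fun interes => q.2.contains interes)
        if coincidencias.isEmpty then cu else cu ++ [(q.1, coincidencias)]) []))
    PySem.Dict.empty).items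

-- ===== PORT B =====
-- inverted index: caracteristica -> inmuebles having it (dict.fromkeys dedups each characteristic list)
def pvIndex (inmuebles_con_caracteristicas : List (String × List String)) : PySem.Dict String (List String) :=
  inmuebles_con_caracteristicas.foldl (fun d q =>
    (PySem.List.dedup q.2).foldl (fun d c => d.modify c [] (· ++ [q.1])) d) PySem.Dict.empty

-- scatter one user's intereses through the index: inmueble -> matched intereses (interest order)
def pvMatches (index : PySem.Dict String (List String)) (intereses : List String) : PySem.Dict String (List String) :=
  intereses.foldl (fun m x =>
    (index.getD x []).foldl (fun m i => m.modify i [] (· ++ [x])) m) PySem.Dict.empty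

def calcular_coincidencias_alt (intereses_por_usuario : List (String × List String)) (inmuebles_con_caracteristicas : List (String × List String)) : List (String × List (String × List String)) :=
  let index := pvIndex inmuebles_con_caracteristicas
  (intereses_por_usuario.foldl (fun r p =>
      let ms := pvMatches index p.2
      r.insert p.1 (inmuebles_con_caracteristicas.filterMap (fun q =>
        if ms.contains q.1 then some (q.1, ms.getD q.1 []) else none)))
    PySem.Dict.empty).items

-- ===== PRECONDITION & SPEC =====
-- Pre_ excludes association lists with duplicate inmueble keys, which no Python dict argument can
-- present (dict keys are unique); on such lists B's order-restoring final pass is unspecified.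
def Pre_calcular_coincidencias (intereses_por_usuario : List (String × List String)) (inmuebles_con_caracteristicas : List (String × List String)) : Prop :=
  (inmuebles_con_caracteristicas.map Prod.fst).Nodup
instance (intereses_por_usuario : List (String × List String)) (inmuebles_con_caracteristicas : List (String × List String)) : Decidable (Pre_calcular_coincidencias intereses_por_usuario inmuebles_con_caracteristicas) := by unfold Pre_calcular_coincidencias; infer_instance
def pvWitness_calcular_coincidencias : (List (String × List String)) × (List (String × List String)) :=
  ([("ana", ["piscina", "garaje"])], [("casa1", ["piscina"]), ("casa2", ["garaje", "piscina"])])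

def Spec_calcular_coincidencias (intereses_por_usuario : List (String × List String)) (inmuebles_con_caracteristicas : List (String × List String)) (out : List (String × List (String × List String))) : Prop := out = calcular_coincidencias_alt intereses_por_usuario inmuebles_con_caracteristicas
instance (intereses_por_usuario : List (String × List String)) (inmuebles_con_caracteristicas : List (String × List String)) (out : List (String × List (String × List String))) : Decidable (Spec_calcular_coincidencias intereses_por_usuario inmuebles_con_caracteristicas out) := by unfold Spec_calcular_coincidencias; infer_instance

-- ===== CLAIM (what is proved, stated in full; the proofs are below) =====
def Claim_equal_calcular_coincidencias : Prop := ∀ (intereses_por_usuario : List (String × List String)) (inmuebles_con_caracteristicas : List (String × List String)), Dom_calcular_coincidencias intereses_por_usuario inmuebles_con_caracteristicas → Pre_calcular_coincidencias intereses_por_usuario inmuebles_con_caracteristicas → Spec_calcular_coincidencias intereses_por_usuario inmuebles_con_caracteristicas (calcular_coincidencias intereses_por_usuario inmuebles_con_caracteristicas)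

-- ===== LEMMAS AND PROOFS =====

-- a nested scatter loop is the canonical modify-append fold over the flattened pair list
theorem pv_foldl_nested_modify {κ α ν : Type} [BEq κ] (l : List α) (f : α → List κ) (val : α → ν) (d : PySem.Dict κ (List ν)) :
    l.foldl (fun d a => (f a).foldl (fun d k => d.modify k [] (· ++ [val a])) d) d
      = (l.flatMap (fun a => (f a).map (fun k => (k, val a)))).foldl (fun d p => d.modify p.1 [] (· ++ [p.2])) d := by
  induction l generalizing d with
  | nil => rfl
  | cons a l ih => simp [List.foldl_append, List.foldl_map, ih]

theorem pv_filter_beq_of_nodup {κ : Type} [BEq κ] [LawfulBEq κ] (L : List κ) (h : L.Nodup) (c : κ) :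
    L.filter (· == c) = if L.contains c then [c] else [] := by
  induction L with
  | nil => rfl
  | cons a L ih =>
    rcases List.nodup_cons.mp h with ⟨ha, hL⟩
    by_cases hac : a = c
    · subst hac
      have hc : L.contains a = false := by simpa [List.contains_iff_mem] using ha
      simp only [List.filter_cons, beq_self_eq_true, if_pos, ih hL, hc]
      simp [ha]
    · simp [hac, ih hL, Ne.symm hac]

theorem pv_flatMap_ite_singleton {α β : Type} (l : List α) (p : α → Bool) (g : α → β) :
    (l.flatMap (fun a => if p a then [g a] else [])) = (l.filter p).map g := by
  induction l with
  | nil => rfl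
  | cons a l ih => by_cases h : p a <;> simp [h, ih]

theorem pv_any_eq_not_isEmpty_filter {α : Type} (l : List α) (p : α → Bool) :
    l.any p = !(l.filter p).isEmpty := by
  induction l with
  | nil => rfl
  | cons a l ih => by_cases h : p a <;> simp [h, ih]

-- characterization of the inverted index
theorem pv_index_getD (inm : List (String × List String)) (c : String) :
    (pvIndex inm).getD c [] = (inm.filter (fun q => q.2.contains c)).map Prod.fst := by
  unfold pvIndex
  rw [pv_foldl_nested_modify, PySem.Dict.getD_foldl_modify_append]
  rw [List.filter_flatMap, List.map_flatMap]
  calc (inm.flatMap fun q => ((((PySem.List.dedup q.2).map (fun k => (k, q.1))).filter (fun p => p.1 == c)).map Prod.snd))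
      = inm.flatMap (fun q => if q.2.contains c then [q.1] else []) := by
        apply List.flatMap_congr
        intro q _
        rw [List.filter_map]
        have hcomp : ((fun p : String × String => p.1 == c) ∘ (fun k => (k, q.1))) = (· == c) := rfl
        rw [hcomp, pv_filter_beq_of_nodup _ (PySem.List.nodup_dedup q.2) c]
        have hmem : (PySem.List.dedup q.2).contains c = q.2.contains c := by
          apply Bool.coe_iff_coe.mp
          simp
        rw [hmem]
        by_cases h : c ∈ q.2 <;> simp [h]
    _ = (inm.filter (fun q => q.2.contains c)).map Prod.fst := pv_flatMap_ite_singleton _ _ _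

theorem pv_index_nodup (inm : List (String × List String)) (h : (inm.map Prod.fst).Nodup) (c : String) :
    ((pvIndex inm).getD c []).Nodup := by
  rw [pv_index_getD]
  exact List.Nodup.sublist (List.Sublist.map Prod.fst List.filter_sublist) h

theorem pv_index_contains (inm : List (String × List String)) (h : (inm.map Prod.fst).Nodup)
    (q : String × List String) (hq : q ∈ inm) (x : String) :
    ((pvIndex inm).getD x []).contains q.1 = q.2.contains x := by
  rw [pv_index_getD]
  apply Bool.coe_iff_coe.mp
  simp only [List.contains_iff_mem, List.mem_map, List.mem_filter]
  constructor
  · rintro ⟨r, ⟨hr, hrx⟩, hr1⟩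
    have hrq : r = q := List.inj_on_of_nodup_map h hr hq hr1
    subst hrq; exact hrx
  · intro hx; exact ⟨q, ⟨hq, hx⟩, rfl⟩

-- contains on the canonical scatter fold
theorem pv_contains_scatter {κ ν : Type} [BEq κ] [LawfulBEq κ] (l : List (κ × ν)) (d : PySem.Dict κ (List ν)) (c : κ) :
    ((l.foldl (fun d p => d.modify p.1 [] (· ++ [p.2])) d).contains c) = (d.contains c || l.any (fun p => p.1 == c)) := by
  induction l generalizing d with
  | nil => rw [List.foldl_nil, List.any_nil, Bool.or_false]
  | cons p l ih =>
    rw [List.foldl_cons, ih, PySem.Dict.contains_modify, List.any_cons]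
    by_cases h : p.1 = c
    · subst h; simp
    · have h1 : (c == p.1) = false := by simp [Ne.symm h]
      have h2 : (p.1 == c) = false := by simp [h]
      rw [h1, h2]
      simp

-- matches characterization at a key of the property dict
theorem pv_matches_getD (inm : List (String × List String)) (h : (inm.map Prod.fst).Nodup)
    (I : List String) (q : String × List String) (hq : q ∈ inm) :
    (pvMatches (pvIndex inm) I).getD q.1 [] = I.filter (fun x => q.2.contains x) := by
  unfold pvMatches
  rw [pv_foldl_nested_modify I (fun x => (pvIndex inm).getD x []) (fun x => x),
      PySem.Dict.getD_foldl_modify_append]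
  rw [List.filter_flatMap, List.map_flatMap]
  calc (I.flatMap fun x => (((((pvIndex inm).getD x []).map (fun k => (k, x))).filter (fun p => p.1 == q.1)).map Prod.snd))
      = I.flatMap (fun x => if q.2.contains x then [x] else []) := by
        apply List.flatMap_congr
        intro x _
        rw [List.filter_map]
        have hcomp : ((fun p : String × String => p.1 == q.1) ∘ (fun k => (k, x))) = (· == q.1) := rfl
        rw [hcomp, pv_filter_beq_of_nodup _ (pv_index_nodup inm h x) q.1, pv_index_contains inm h q hq x]
        by_cases hx : x ∈ q.2 <;> simp [hx]
    _ = (I.filter (fun x => q.2.contains x)).map id := pv_flatMap_ite_singleton _ _ _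
    _ = I.filter (fun x => q.2.contains x) := List.map_id _

theorem pv_matches_contains (inm : List (String × List String)) (h : (inm.map Prod.fst).Nodup)
    (I : List String) (q : String × List String) (hq : q ∈ inm) :
    (pvMatches (pvIndex inm) I).contains q.1 = !(I.filter (fun x => q.2.contains x)).isEmpty := by
  unfold pvMatches
  rw [pv_foldl_nested_modify I (fun x => (pvIndex inm).getD x []) (fun x => x),
      pv_contains_scatter]
  rw [PySem.Dict.contains_empty, Bool.false_or, List.any_flatMap]
  rw [← pv_any_eq_not_isEmpty_filter]
  refine List.any_congr rfl fun x => ?_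
  rw [List.any_map]
  have hc : (((pvIndex inm).getD x []).any ((fun p : String × String => p.1 == q.1) ∘ (fun k => (k, x))))
      = ((pvIndex inm).getD x []).contains q.1 := by
    apply Bool.coe_iff_coe.mp
    simp [List.any_eq_true, Function.comp]
  rw [hc, pv_index_contains inm h q hq x]

-- A's per-user accumulation loop as a filterMap
theorem pv_foldl_ite_append {α β : Type} (l : List α) (p : α → Bool) (f : α → β) (init : List β) :
    l.foldl (fun acc q => if p q then acc else acc ++ [f q]) init
      = init ++ l.filterMap (fun q => if p q then none else some (f q)) := by
  induction l generalizing init with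
  | nil => simp
  | cons a l ih => by_cases h : p a <;> simp [h, ih, List.append_assoc]

-- the per-user rows agree
theorem pv_row_eq (inm : List (String × List String)) (h : (inm.map Prod.fst).Nodup) (I : List String) :
    (inm.foldl (fun cu q =>
        let coincidencias := I.filter (fun interes => q.2.contains interes)
        if coincidencias.isEmpty then cu else cu ++ [(q.1, coincidencias)]) [])
      = inm.filterMap (fun q =>
          if (pvMatches (pvIndex inm) I).contains q.1 then some (q.1, (pvMatches (pvIndex inm) I).getD q.1 []) else none) := by
  show (inm.foldl (fun cu q => if (I.filter (fun interes => q.2.contains interes)).isEmpty then cu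
          else cu ++ [(q.1, I.filter (fun interes => q.2.contains interes))]) []) = _
  rw [pv_foldl_ite_append inm (fun q => (I.filter (fun interes => q.2.contains interes)).isEmpty)
        (fun q => (q.1, I.filter (fun interes => q.2.contains interes))) []]
  rw [List.nil_append]
  apply List.filterMap_congr
  intro q hq
  rw [pv_matches_contains inm h I q hq, pv_matches_getD inm h I q hq]
  cases hE : (I.filter (fun x => q.2.contains x)).isEmpty <;> simp

-- ===== VERDICT (by name: the statement is the Claim_ definition above) =====
theorem calcular_coincidencias_spec : Claim_equal_calcular_coincidencias := by
  intro u inm _ hpre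
  unfold Spec_calcular_coincidencias calcular_coincidencias calcular_coincidencias_alt
  have hstep : (fun (acc : PySem.Dict String (List (String × List String))) (p : String × List String) =>
      acc.insert p.1 (inm.foldl (fun cu q =>
        let coincidencias := p.2.filter (fun interes => q.2.contains interes)
        if coincidencias.isEmpty then cu else cu ++ [(q.1, coincidencias)]) []))
    = (fun (acc : PySem.Dict String (List (String × List String))) (p : String × List String) =>
      acc.insert p.1 (inm.filterMap (fun q =>
        if (pvMatches (pvIndex inm) p.2).contains q.1 then some (q.1, (pvMatches (pvIndex inm) p.2).getD q.1 []) else none))) := by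
    funext acc p
    exact congrArg _ (pv_row_eq inm hpre p.2)
  rw [hstep]
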